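-- pv_equiv track=rewrite | github.com/cliu268/playground | adv-hw7.py | prefixList
-- ===== SOURCE A (Python) =====
-- def prefixList(A, B):
--     if len(A) > len(B):
--         return False
--     elif len(A) == len(B):
--         return A == B
--     elif A[0] != B[0]:
--         return prefixList(A, B[1:])
--     else:
--         return A == B[:len(A)]
-- ===== SOURCE B (Python) =====
-- def prefixList(A, B):
--     if len(A) > len(B):
--         return False
--     if len(A) == len(B):
--         return A == B
--     for i in range(len(B) - len(A) + 1):
--         if B[i] == A[0]:
--             return A == B[i:i+len(A)]
--     return False
-- ===== Notes on version B (the rewrite author's own statement) =====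
-- stated objective: alternative
-- what changed: A's tail recursion that repeatedly slices B[1:] is replaced by an explicit index loop over range(len(B)-len(A)+1) that returns at the first position where B[i] == A[0], comparing the window B[i:i+len(A)] there.
import Mathlib
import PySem

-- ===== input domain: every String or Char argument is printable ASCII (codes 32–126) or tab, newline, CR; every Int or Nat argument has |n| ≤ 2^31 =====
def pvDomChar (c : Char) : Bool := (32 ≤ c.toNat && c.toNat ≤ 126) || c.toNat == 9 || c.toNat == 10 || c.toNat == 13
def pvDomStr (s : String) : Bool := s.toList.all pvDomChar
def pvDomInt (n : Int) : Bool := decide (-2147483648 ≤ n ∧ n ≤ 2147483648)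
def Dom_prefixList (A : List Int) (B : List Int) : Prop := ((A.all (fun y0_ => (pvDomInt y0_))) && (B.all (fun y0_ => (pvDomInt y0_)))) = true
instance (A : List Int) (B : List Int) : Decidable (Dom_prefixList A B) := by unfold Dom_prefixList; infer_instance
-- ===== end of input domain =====

-- B replaces A's tail recursion (slicing B[1:] each step) by an explicit index loop; same return value everywhere, equivalence is about the return value.

-- ===== PORT A =====
def prefixList (A : List Int) (B : List Int) : Bool :=
  if A.length > B.length then false
  else if A.length = B.length then A == B
  else
    match PySem.List.pyGet? A 0, PySem.List.pyGet? B 0 with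
    | some a0, some b0 =>
      if a0 ≠ b0 then prefixList A (PySem.List.slice B (some 1) none)
      else A == PySem.List.slice B none (some (A.length : Int))
    | _, _ => false            -- Python raises IndexError here (A = [], B ≠ []); excluded by Pre_
termination_by B.length
decreasing_by
  simp only [PySem.List.slice_from_one, List.length_tail]
  omega

-- ===== PORT B =====
-- the for-loop 'for i in range(stop)' of Source B, current index i
def altLoop (A : List Int) (B : List Int) (i : Nat) (stop : Nat) : Bool :=
  if i < stop then
    match PySem.List.pyGet? B (i : Int) with
    | none => false            -- unreachable: every loop index is in range
    | some bi =>
      match PySem.List.pyGet? A 0 with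
      | none => false          -- Python raises IndexError here (A = []); excluded by Pre_
      | some a0 =>
        if bi == a0 then A == PySem.List.slice B (some (i : Int)) (some ((i : Int) + (A.length : Int)))
        else altLoop A B (i + 1) stop
  else false
termination_by stop - i

def prefixList_alt (A : List Int) (B : List Int) : Bool :=
  if A.length > B.length then false
  else if A.length = B.length then A == B
  else altLoop A B 0 (B.length - A.length + 1)

-- ===== PRECONDITION & SPEC =====
-- Pre_ excludes exactly the inputs where the Python A raises IndexError (A = [] with B nonempty); B raises there too.
def Pre_prefixList (A : List Int) (B : List Int) : Prop := A = [] → B = []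
instance (A : List Int) (B : List Int) : Decidable (Pre_prefixList A B) := by unfold Pre_prefixList; infer_instance
def pvWitness_prefixList : List Int × List Int := ([1], [2, 1, 3])

def Spec_prefixList (A : List Int) (B : List Int) (out : Bool) : Prop := out = prefixList_alt A B
instance (A : List Int) (B : List Int) (out : Bool) : Decidable (Spec_prefixList A B out) := by unfold Spec_prefixList; infer_instance

-- ===== CLAIM (what is proved, stated in full; the proofs are below) =====
def Claim_equal_prefixList : Prop := ∀ (A : List Int) (B : List Int), Dom_prefixList A B → Pre_prefixList A B → Spec_prefixList A B (prefixList A B)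

-- ===== LEMMAS AND PROOFS =====

-- stepping the loop past the head of B shifts every index by one
lemma altLoop_shift (A B' : List Int) (b : Int) (i stop : Nat) :
    altLoop A (b :: B') (i + 1) (stop + 1) = altLoop A B' i stop := by
  induction hn : stop - i generalizing i with
  | zero =>
    conv_lhs => rw [altLoop]
    conv_rhs => rw [altLoop]
    simp [show ¬ (i + 1 < stop + 1) from by omega, show ¬ (i < stop) from by omega]
  | succ n ih =>
    conv_lhs => rw [altLoop]
    conv_rhs => rw [altLoop]
    have hi : i < stop := by omega
    simp only [show i + 1 < stop + 1 from by omega, hi, if_pos]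
    have hget : PySem.List.pyGet? (b :: B') ((i + 1 : Nat) : Int) = PySem.List.pyGet? B' (i : Nat) := by
      simp
    rw [hget]
    cases hB : PySem.List.pyGet? B' ((i : Nat) : Int) with
    | none => rfl
    | some bi =>
      cases hA : PySem.List.pyGet? A 0 with
      | none => rfl
      | some a0 =>
        by_cases hba : bi == a0
        · simp only [hba, if_pos]
          have hsl : PySem.List.slice (b :: B') (some ((i + 1 : Nat) : Int))
              (some (((i + 1 : Nat) : Int) + (A.length : Int)))
              = PySem.List.slice B' (some (i : Nat)) (some (((i : Nat) : Int) + (A.length : Int))) := by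
            rw [PySem.List.slice_natCast_add, PySem.List.slice_natCast_add]
            simp
          rw [hsl]
        · simp only [hba, Bool.false_eq_true, if_false]
          exact ih (i + 1) (by omega)

-- the loop's last iteration on a window of exactly length |A| is the full comparison
lemma altLoop_last (a0 : Int) (A2 B' : List Int) (h : (a0 :: A2).length = B'.length) :
    altLoop (a0 :: A2) B' 0 1 = ((a0 :: A2) == B') := by
  cases B' with
  | nil => simp at h
  | cons b B2 =>
    conv_lhs => rw [altLoop]
    simp only [Nat.zero_lt_one, if_pos, Nat.cast_zero]
    have hget : PySem.List.pyGet? (b :: B2) (0 : Int) = some b := by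
      simp [PySem.List.pyGet?, PySem.List.pyIdx?]
    have hgetA : PySem.List.pyGet? (a0 :: A2) (0 : Int) = some a0 := by
      simp [PySem.List.pyGet?, PySem.List.pyIdx?]
    rw [hget, hgetA]
    by_cases hba : b == a0
    · simp only [hba, if_pos]
      have hsl : PySem.List.slice (b :: B2) (some ((0 : Nat) : Int))
          (some (((0 : Nat) : Int) + ((a0 :: A2).length : Int))) = b :: B2 := by
        rw [PySem.List.slice_natCast_add]
        simp only [List.drop_zero]
        exact List.take_of_length_le (by simp only [List.length_cons] at h ⊢; omega)
      have hsl' : PySem.List.slice (b :: B2) (some (0 : Int))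
          (some ((0 : Int) + ((a0 :: A2).length : Int))) = b :: B2 := by
        simpa using hsl
      rw [hsl']
    · simp only [hba, Bool.false_eq_true, if_false]
      conv_lhs => rw [altLoop]
      simp only [Nat.lt_irrefl, if_false]
      have hne : a0 ≠ b := fun he => by simp [he] at hba
      symm
      simp only [beq_eq_false_iff_ne]
      intro he
      exact hne (by injection he)

-- main equivalence in the searching case
lemma main_lemma (B A : List Int) (hA : A ≠ []) (h : A.length < B.length) :
    prefixList A B = altLoop A B 0 (B.length - A.length + 1) := by
  induction B with
  | nil => simp at h
  | cons b B' ih =>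
    obtain ⟨a0, A2, rfl⟩ : ∃ a0 A2, A = a0 :: A2 := by
      cases A with
      | nil => exact absurd rfl hA
      | cons x xs => exact ⟨x, xs, rfl⟩
    conv_lhs => rw [prefixList]
    have hgt : ¬ (a0 :: A2).length > (b :: B').length := by omega
    have heq : ¬ (a0 :: A2).length = (b :: B').length := by omega
    simp only [hgt, heq, if_neg, not_false_iff]
    have hgetA : PySem.List.pyGet? (a0 :: A2) 0 = some a0 := by
      simp [PySem.List.pyGet?, PySem.List.pyIdx?]
    have hgetB : PySem.List.pyGet? (b :: B') 0 = some b := by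
      simp [PySem.List.pyGet?, PySem.List.pyIdx?]
    rw [hgetA, hgetB]
    conv_rhs => rw [altLoop]
    have hstop : 0 < (b :: B').length - (a0 :: A2).length + 1 := by omega
    simp only [hstop, if_pos, Nat.cast_zero, hgetB, hgetA]
    by_cases hba : a0 = b
    · -- match at the head: both compare the initial window
      subst hba
      simp only [ne_eq, not_true_eq_false, if_false, beq_self_eq_true, if_true]
      have hsl : PySem.List.slice (a0 :: B') (some ((0 : Nat) : Int))
          (some (((0 : Nat) : Int) + (((a0 :: A2).length : Nat) : Int)))
          = PySem.List.slice (a0 :: B') none (some (((a0 :: A2).length : Nat) : Int)) := by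
        rw [PySem.List.slice_natCast_add, PySem.List.slice_to_natCast]
        simp
      have hsl' : PySem.List.slice (a0 :: B') (some (0 : Int))
          (some ((0 : Int) + (((a0 :: A2).length : Nat) : Int)))
          = PySem.List.slice (a0 :: B') none (some (((a0 :: A2).length : Nat) : Int)) := by
        simp only [Nat.cast_zero] at hsl; exact hsl
      rw [hsl']
    · -- head mismatch: A recurses on the tail, B's loop advances to index 1
      have hba' : (b == a0) = false := by
        simp only [beq_eq_false_iff_ne]
        exact fun he => hba he.symm
      simp only [ne_eq, hba, not_false_iff, if_pos, hba', Bool.false_eq_true, if_false]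
      rw [PySem.List.slice_from_one]
      simp only [List.tail_cons]
      have hle : (a0 :: A2).length ≤ B'.length := by
        simp only [List.length_cons] at h ⊢; omega
      have hstop' : (b :: B').length - (a0 :: A2).length + 1
          = (B'.length - (a0 :: A2).length + 1) + 1 := by
        simp only [List.length_cons] at hle ⊢; omega
      rw [hstop', show (1 : Nat) = 0 + 1 from rfl, altLoop_shift]
      rcases lt_or_eq_of_le hle with hlt | heq'
      · exact ih hlt
      · have h1 : B'.length - (a0 :: A2).length + 1 = 1 := by omega
        rw [h1, altLoop_last a0 A2 B' heq']
        conv_lhs => rw [prefixList]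
        simp [heq']

-- ===== VERDICT (by name: the statement is the Claim_ definition above) =====
theorem prefixList_spec : Claim_equal_prefixList := by
  intro A B _ hPre
  unfold Spec_prefixList prefixList_alt
  by_cases hgt : A.length > B.length
  · rw [prefixList]; simp [hgt]
  · by_cases heq : A.length = B.length
    · rw [prefixList]; simp [heq]
    · have hlt : A.length < B.length := by omega
      have hA : A ≠ [] := by
        intro hAe
        have := hPre hAe
        subst hAe; subst this; simp at hlt
      simp only [hgt, heq, if_neg, not_false_iff]
      exact main_lemma B A hA hlt
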